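-- pv_equiv track=rewrite | github.com/OatmealLick/advent-of-code-2021 | ala/solutions/aoc_day3.py | get_zeros_and_ones
-- ===== SOURCE A (Python) =====
-- def get_zeros_and_ones(measurements):
--     zeros = [0] * len(measurements[0])
--     ones = [0] * len(measurements[0])
--
--     for measurement in measurements:
--         for index in range(len(measurements[0])):
--             if measurement[index] == '0':
--                 zeros[index] += 1
--             else:
--                 ones[index] += 1
--
--     return zeros, ones
-- ===== SOURCE B (Python) =====
-- def get_zeros_and_ones(measurements):
--     width = len(measurements[0])
--
--     def count(rows):
--         # divide and conquer: count vectors for each half, merge by addition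
--         if len(rows) == 1:
--             m = rows[0]
--             z = [1 if m[i] == '0' else 0 for i in range(width)]
--             return z, [1 - v for v in z]
--         mid = len(rows) // 2
--         z1, o1 = count(rows[:mid])
--         z2, o2 = count(rows[mid:])
--         return [a + b for a, b in zip(z1, z2)], [a + b for a, b in zip(o1, o2)]
--
--     return count(measurements)
-- ===== Notes on version B (the rewrite author's own statement) =====
-- stated objective: alternative
-- what changed: B replaces A's double loop mutating two counter arrays by a divide-and-conquer recursion: split the row list in halves, count each half, and merge the per-column (zeros, ones) vectors by elementwise addition (a single row yields an indicator vector and its complement).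
import Mathlib
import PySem

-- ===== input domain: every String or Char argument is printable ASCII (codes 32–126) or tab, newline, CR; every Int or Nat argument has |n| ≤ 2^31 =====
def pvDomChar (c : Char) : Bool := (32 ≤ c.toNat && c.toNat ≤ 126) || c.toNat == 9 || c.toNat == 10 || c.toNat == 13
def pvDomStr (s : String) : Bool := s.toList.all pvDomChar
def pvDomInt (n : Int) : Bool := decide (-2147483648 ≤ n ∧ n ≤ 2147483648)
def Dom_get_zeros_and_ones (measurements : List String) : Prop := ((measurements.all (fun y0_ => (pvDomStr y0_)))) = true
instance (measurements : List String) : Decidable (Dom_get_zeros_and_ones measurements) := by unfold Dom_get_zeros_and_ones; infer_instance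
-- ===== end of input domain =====

-- B counts by divide-and-conquer (split rows in halves, merge per-column count vectors by addition) instead of A's double loop over two mutable counter arrays; proved equal wherever A returns.


-- ===== PORT A =====
-- row-major: for each measurement, for each index in range(width), bump zeros or ones.
-- measurements[0] and measurement[index] are in range on Pre_; headD/getD are exact there.
def get_zeros_and_ones (measurements : List String) : List Int × List Int :=
  let w := (measurements.headD "").toList.length
  measurements.foldl
    (fun st m =>
      (List.range w).foldl
        (fun st2 i =>
          if m.toList.getD i ' ' = '0' then
            (st2.1.set i (st2.1.getD i 0 + 1), st2.2)
          else
            (st2.1, st2.2.set i (st2.2.getD i 0 + 1)))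
        st)
    (List.replicate w (0 : Int), List.replicate w (0 : Int))

-- ===== PORT B =====
-- divide and conquer over the row list: a single row yields its '0'-indicator vector
-- (and its complement); two halves are merged by elementwise addition.
-- The [] branch is a totality guard only: Python's count([]) is unreachable (Pre_ forbids []).
def pvCountHalves (measurements : List String) (w : Nat) : List Int × List Int :=
  if h : measurements.length ≤ 1 then
    match measurements with
    | [] => (List.replicate w 0, List.replicate w 0)
    | m :: _ =>
      let z := (List.range w).map (fun i => if m.toList.getD i ' ' = '0' then (1 : Int) else 0)
      (z, z.map (fun v => 1 - v))
  else
    let mid := measurements.length / 2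
    let p1 := pvCountHalves (measurements.take mid) w
    let p2 := pvCountHalves (measurements.drop mid) w
    (p1.1.zipWith (· + ·) p2.1, p1.2.zipWith (· + ·) p2.2)
termination_by measurements.length
decreasing_by
  · simp only [List.length_take]; omega
  · simp only [List.length_drop]; omega

def get_zeros_and_ones_alt (measurements : List String) : List Int × List Int :=
  pvCountHalves measurements (measurements.headD "").toList.length

-- ===== PRECONDITION & SPEC =====
-- Pre_ excludes exactly the inputs where Python A raises IndexError: the empty list
-- (measurements[0]) and lists containing a row shorter than the first row (measurement[index]).
def Pre_get_zeros_and_ones (measurements : List String) : Prop :=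
  measurements ≠ [] ∧
    ∀ m ∈ measurements, (measurements.headD "").toList.length ≤ m.toList.length
instance (measurements : List String) : Decidable (Pre_get_zeros_and_ones measurements) := by
  unfold Pre_get_zeros_and_ones; infer_instance

def pvWitness_get_zeros_and_ones : List String := ["010", "110"]

def Spec_get_zeros_and_ones (measurements : List String) (out : List Int × List Int) : Prop := out = get_zeros_and_ones_alt measurements
instance (measurements : List String) (out : List Int × List Int) : Decidable (Spec_get_zeros_and_ones measurements out) := by unfold Spec_get_zeros_and_ones; infer_instance

-- ===== CLAIM (what is proved, stated in full; the proofs are below) =====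
def Claim_equal_get_zeros_and_ones : Prop := ∀ (measurements : List String), Dom_get_zeros_and_ones measurements → Pre_get_zeros_and_ones measurements → Spec_get_zeros_and_ones measurements (get_zeros_and_ones measurements)

-- ===== LEMMAS AND PROOFS =====

-- per-column counts (spec glue used only in the proofs)
def colZ (ms : List String) (j : Nat) : Int :=
  ((ms.filter (fun m => m.toList.getD j ' ' = '0')).length : Int)
def colO (ms : List String) (j : Nat) : Int :=
  ((ms.filter (fun m => m.toList.getD j ' ' ≠ '0')).length : Int)

lemma colZ_append (l r : List String) (j : Nat) :
    colZ (l ++ r) j = colZ l j + colZ r j := by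
  simp [colZ, List.filter_append]
lemma colO_append (l r : List String) (j : Nat) :
    colO (l ++ r) j = colO l j + colO r j := by
  simp [colO, List.filter_append]

lemma zipWith_add_map {α : Type} (l : List α) (f g : α → Int) :
    List.zipWith (· + ·) (l.map f) (l.map g) = l.map (fun a => f a + g a) := by
  induction l with
  | nil => rfl
  | cons a t ih => simp [ih]

-- characterisation of B's divide-and-conquer recursion on nonempty lists
lemma pvCountHalves_eq :
    ∀ (n : Nat) (ms : List String), ms.length ≤ n → ms ≠ [] → ∀ (w : Nat),
      pvCountHalves ms w = ((List.range w).map (colZ ms), (List.range w).map (colO ms)) := by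
  intro n
  induction n with
  | zero =>
      intro ms hlen hne w
      cases ms with
      | nil => exact absurd rfl hne
      | cons a t => simp at hlen
  | succ n ih =>
      intro ms hlen hne w
      rw [pvCountHalves]
      by_cases h1 : ms.length ≤ 1
      · rw [dif_pos h1]
        cases ms with
        | nil => exact absurd rfl hne
        | cons m t =>
            have ht : t = [] := by
              cases t with
              | nil => rfl
              | cons b u => simp at h1
            subst ht
            apply Prod.ext
            · dsimp only
              apply List.map_congr_left
              intro i _
              simp only [colZ, List.filter, List.getD]
              by_cases hc : m.toList[i]?.getD ' ' = '0' <;> simp [hc]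
            · dsimp only
              rw [List.map_map]
              apply List.map_congr_left
              intro i _
              simp only [Function.comp, colO, List.filter, List.getD]
              by_cases hc : m.toList[i]?.getD ' ' = '0' <;> simp [hc]
      · rw [dif_neg h1]
        have h2 : 2 ≤ ms.length := by omega
        have hk1 : 1 ≤ ms.length / 2 := by omega
        have hk2 : ms.length / 2 < ms.length := by omega
        have htake : (ms.take (ms.length / 2)).length = ms.length / 2 := by
          simp [List.length_take]; omega
        have hdrop : (ms.drop (ms.length / 2)).length = ms.length - ms.length / 2 :=
          List.length_drop
        have hne1 : ms.take (ms.length / 2) ≠ [] := by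
          intro hc; rw [hc] at htake; simp at htake; omega
        have hne2 : ms.drop (ms.length / 2) ≠ [] := by
          intro hc; rw [hc] at hdrop; simp at hdrop; omega
        dsimp only
        rw [ih _ (by omega) hne1 w, ih _ (by omega) hne2 w]
        simp only [zipWith_add_map]
        have hms : ms.take (ms.length / 2) ++ ms.drop (ms.length / 2) = ms :=
          List.take_append_drop _ _
        apply Prod.ext
        · apply List.map_congr_left
          intro j _
          rw [← colZ_append, hms]
        · apply List.map_congr_left
          intro j _
          rw [← colO_append, hms]

-- ===== A-side: split the paired fold into two independent counter folds =====
def bumpCol (p : Char → Bool) (m : List Char) (z : List Int) (idxs : List Nat) : List Int :=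
  idxs.foldl (fun z' i => if p (m.getD i ' ') then z'.set i (z'.getD i 0 + 1) else z') z

lemma bumpCol_nil (p : Char → Bool) (m : List Char) (z : List Int) :
    bumpCol p m z [] = z := rfl

lemma bumpCol_cons (p : Char → Bool) (m : List Char) (z : List Int) (i : Nat) (t : List Nat) :
    bumpCol p m z (i :: t)
      = bumpCol p m (if p (m.getD i ' ') then z.set i (z.getD i 0 + 1) else z) t := rfl

lemma setGetD_self (z : List Int) (i : Nat) (h : i < z.length) (v : Int) :
    (z.set i v).getD i 0 = v := by
  simp [List.getD, h]

lemma setGetD_ne (z : List Int) (i j : Nat) (h : ¬ i = j) (v : Int) :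
    (z.set i v).getD j 0 = z.getD j 0 := by
  simp [List.getD, h]

lemma inner_split (m : List Char) (idxs : List Nat) (st : List Int × List Int) :
    idxs.foldl
      (fun st2 i =>
        if m.getD i ' ' = '0' then
          (st2.1.set i (st2.1.getD i 0 + 1), st2.2)
        else
          (st2.1, st2.2.set i (st2.2.getD i 0 + 1)))
      st
    = (bumpCol (fun c => c = '0') m st.1 idxs, bumpCol (fun c => c ≠ '0') m st.2 idxs) := by
  induction idxs generalizing st with
  | nil => simp [bumpCol_nil]
  | cons i t ih =>
      rw [List.foldl_cons, ih, bumpCol_cons, bumpCol_cons]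
      by_cases h : m.getD i ' ' = '0'
      · rw [if_pos h,
            if_pos (show (decide (m.getD i ' ' = '0')) = true by
              simp only [decide_eq_true_eq]; exact h),
            if_neg (show ¬ (decide (m.getD i ' ' ≠ '0')) = true by
              simp only [decide_eq_true_eq]; exact fun hc => hc h)]
      · rw [if_neg h,
            if_neg (show ¬ (decide (m.getD i ' ' = '0')) = true by
              simp only [decide_eq_true_eq]; exact h),
            if_pos (show (decide (m.getD i ' ' ≠ '0')) = true by
              simp only [decide_eq_true_eq]; exact h)]

lemma bumpCol_length (p : Char → Bool) (m : List Char) (z : List Int) (idxs : List Nat) :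
    (bumpCol p m z idxs).length = z.length := by
  induction idxs generalizing z with
  | nil => rfl
  | cons i t ih =>
      rw [bumpCol_cons, ih]
      split_ifs <;> simp

lemma bumpCol_getD (p : Char → Bool) (m : List Char) (z : List Int) (idxs : List Nat)
    (j : Nat) (hj : j < z.length) (hi : ∀ i ∈ idxs, i < z.length) :
    (bumpCol p m z idxs).getD j 0
      = z.getD j 0 + ((idxs.filter (fun i => i = j ∧ p (m.getD i ' '))).length : Int) := by
  induction idxs generalizing z with
  | nil => simp [bumpCol_nil]
  | cons i t ih =>
      have hil : i < z.length := hi i (by simp)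
      have hit : ∀ a ∈ t, a < z.length := fun a ha => hi a (by simp [ha])
      rw [bumpCol_cons, List.filter_cons]
      by_cases hp : p (m.getD i ' ')
      · rw [if_pos hp]
        rw [ih (z.set i (z.getD i 0 + 1)) (by simpa using hj) (by simpa using hit)]
        by_cases hij : i = j
        · subst hij
          rw [setGetD_self z i hil,
              if_pos (show (decide (i = i ∧ p (m.getD i ' ') = true)) = true by
                simp only [decide_eq_true_eq]; exact ⟨trivial, hp⟩),
              List.length_cons]
          push_cast
          ring
        · rw [setGetD_ne z i j hij,
              if_neg (show ¬ (decide (i = j ∧ p (m.getD i ' ') = true)) = true by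
                simp only [decide_eq_true_eq]; rintro ⟨h1, -⟩; exact hij h1)]
      · rw [if_neg hp]
        rw [ih z hj hit,
            if_neg (show ¬ (decide (i = j ∧ p (m.getD i ' ') = true)) = true by
              simp only [decide_eq_true_eq]; rintro ⟨-, h2⟩; exact hp h2)]

lemma filter_range_eq (w j : ℕ) (q : Nat → Bool) (hj : j < w) :
    ((List.range w).filter (fun i => i = j ∧ q i)).length = if q j then 1 else 0 := by
  induction w with
  | zero => omega
  | succ w ih =>
      rw [List.range_succ, List.filter_append, List.length_append]
      by_cases h : j < w
      · rw [ih h]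
        have hwj : ¬ (w = j) := by omega
        simp [hwj]
      · have hw : j = w := by omega
        subst hw
        have h0 : ((List.range j).filter (fun i => i = j ∧ q i)).length = 0 := by
          rw [List.length_eq_zero_iff, List.filter_eq_nil_iff]
          intro a ha
          have := List.mem_range.mp ha
          simp; omega
        rw [h0]
        by_cases hq : q j <;> simp [hq]

lemma outer_component_length (p : Char → Bool) (rows : List String) (w : Nat) (z : List Int) :
    (rows.foldl (fun z' m => bumpCol p m.toList z' (List.range w)) z).length = z.length := by
  induction rows generalizing z with
  | nil => rfl
  | cons m t ih => rw [List.foldl_cons, ih, bumpCol_length]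

lemma outer_component (p : Char → Bool) (rows : List String) (w : Nat) (z : List Int)
    (hz : z.length = w) (j : Nat) (hj : j < w) :
    (rows.foldl (fun z' m => bumpCol p m.toList z' (List.range w)) z).getD j 0
      = z.getD j 0 + ((rows.filter (fun m => p (m.toList.getD j ' '))).length : Int) := by
  induction rows generalizing z with
  | nil => simp
  | cons m t ih =>
      rw [List.foldl_cons, List.filter_cons]
      rw [ih _ (by rw [bumpCol_length, hz])]
      rw [bumpCol_getD p m.toList z (List.range w) j (by omega)
          (by intro i hi; rw [hz]; exact List.mem_range.mp hi)]
      rw [filter_range_eq w j _ hj]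
      by_cases hp : p (m.toList.getD j ' ')
      · rw [if_pos hp, if_pos hp, List.length_cons]
        push_cast
        ring
      · rw [if_neg hp, if_neg hp]
        push_cast
        ring

lemma fold_pair_split (rows : List String) (w : Nat) (st : List Int × List Int) :
    rows.foldl
      (fun st m =>
        (List.range w).foldl
          (fun st2 i =>
            if m.toList.getD i ' ' = '0' then
              (st2.1.set i (st2.1.getD i 0 + 1), st2.2)
            else
              (st2.1, st2.2.set i (st2.2.getD i 0 + 1)))
          st)
      st
    = (rows.foldl (fun z m => bumpCol (fun c => c = '0') m.toList z (List.range w)) st.1,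
       rows.foldl (fun z m => bumpCol (fun c => c ≠ '0') m.toList z (List.range w)) st.2) := by
  induction rows generalizing st with
  | nil => rfl
  | cons m t ih =>
      rw [List.foldl_cons, inner_split, ih, List.foldl_cons, List.foldl_cons]

lemma getD_of_lt (l : List Int) (j : Nat) (h : j < l.length) : l[j] = l.getD j 0 := by
  simp [List.getD, List.getElem?_eq_getElem h]

-- ===== VERDICT (by name: the statement is the Claim_ definition above) =====
theorem get_zeros_and_ones_spec : Claim_equal_get_zeros_and_ones := by
  intro ms _ hpre
  unfold Spec_get_zeros_and_ones get_zeros_and_ones get_zeros_and_ones_alt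
  rw [pvCountHalves_eq ms.length ms le_rfl hpre.1]
  simp only []
  rw [fold_pair_split]
  apply Prod.ext
  · apply List.ext_getElem
    · rw [outer_component_length]; simp
    · intro j h1 h2
      have hj : j < (ms.headD "").toList.length := by
        rw [outer_component_length, List.length_replicate] at h1; exact h1
      rw [getD_of_lt _ _ h1]
      rw [outer_component (fun c => c = '0') ms _ _ (List.length_replicate) j hj]
      rw [List.getD_replicate]
      simp only [List.getElem_map, List.getElem_range, zero_add, colZ]
      exact hj
  · apply List.ext_getElem
    · rw [outer_component_length]; simp
    · intro j h1 h2
      have hj : j < (ms.headD "").toList.length := by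
        rw [outer_component_length, List.length_replicate] at h1; exact h1
      rw [getD_of_lt _ _ h1]
      rw [outer_component (fun c => c ≠ '0') ms _ _ (List.length_replicate) j hj]
      rw [List.getD_replicate]
      simp only [List.getElem_map, List.getElem_range, zero_add, colO]
      exact hj
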